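-- pv_equiv track=rewrite | github.com/pypi-data/pypi-mirror-2 | packages/binstr/binstr-1.2.tar.gz/binstr-1.2/binstr.py | b_nor
-- ===== SOURCE A (Python) =====
-- def b_nor(A='00000000', B='00000000', align='right'): # {{{
--     '''
--     Perform a bitwise NOR on two strings of binary digits, A and B.
--     The align argument can be used to align the shortest of A and B to one
--       side of the other.
--     The returned string is the same length as the longest input.
--     E.g. b_or('0101', '0011') returns '1000'
--          b_or('01010000', '0011') returns '10101100'
--          b_or('01010000', '0011', align='left') returns '10001111'
--     '''
--     assert b_validate(A) == True, 'A is not a valid b_string: %s' % str(A)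
--     assert b_validate(B) == True, 'B is not a valid b_string: %s' % str(B)
--     assert type(align) is str, 'align is not a string: %s' % str(align)
--
--     assert align == 'right' or align == 'left', 'Invalid align: "%s". Use either "right" or "left"' % align
--
--     if len(A) >= len(B): (p, q) = (A, B)
--     else:                (p, q) = (B, A)
--     del A, B
--
--     if align == 'right': q = '0'*(len(p) - len(q)) + q
--     else:                q = q + '0'*(len(p) - len(q))
--     assert len(p) == len(q), 'Error in this function! len(p) must equal len(q). Oh dear.'
--
--     return ''.join([str(int( not( bool(int(a)) or bool(int(b)) ) )) for (a, b) in zip(p, q)])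
--
-- def b_validate(A='', fail_empty=True): # {{{
--     '''
--     Validate that a given string contains only 0s and 1s.
--
--     This will return True if the string is valid, otherwise it returns False.
--
--     E.g. b_validate() returns False
--          b_validate('') returns False
--          b_validate('', fail_empty=False) returns True
--          b_validate('01010101') returns True
--          b_validate('010120101') returns False
--          b_validate('0101 0101') returns False
--     '''
--     # Assertions cannot be used in here because when optimisation is turned on they
--     #   will be compiled out.
--     t = True
--
--     if t and not(type(A) is str): t = False
--     if t and fail_empty and not(len(A) > 0): t = False
--
--     if t:
--         from re import compile as re_compile
--         pattern = re_compile('[^01]')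
--         t = not( bool(pattern.search(A)) )
--         del re_compile, pattern
--
--     return t
-- ===== SOURCE B (Python) =====
-- def b_nor(A='00000000', B='00000000', align='right'):
--     '''
--     Bitwise NOR of two binary digit strings via integer arithmetic:
--     OR the two strings as integers, invert within an n-bit mask,
--     and format back to an n-wide zero-padded binary string.
--     '''
--     assert _is_bstr(A), 'A is not a valid b_string: %s' % str(A)
--     assert _is_bstr(B), 'B is not a valid b_string: %s' % str(B)
--     assert type(align) is str, 'align is not a string: %s' % str(align)
--     assert align == 'right' or align == 'left', 'Invalid align: "%s". Use either "right" or "left"' % align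
--
--     if len(A) >= len(B):
--         p, q = A, B
--     else:
--         p, q = B, A
--     n = len(p)
--     if align == 'right':
--         q = q.rjust(n, '0')
--     else:
--         q = q.ljust(n, '0')
--
--     res = ((1 << n) - 1) ^ (int(p, 2) | int(q, 2))
--     return format(res, '0{}b'.format(n))
--
-- def _is_bstr(s):
--     return type(s) is str and len(s) > 0 and not set(s) - {'0', '1'}
-- ===== Notes on version B (the rewrite author's own statement) =====
-- stated objective: idiomatic
-- what changed: Replaces A's per-character zip/join NOR loop with integer arithmetic: the two strings are parsed as binary integers, ORed, inverted inside an n-bit mask, and formatted back to an n-wide zero-padded binary string; no character loop remains.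
import Mathlib
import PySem

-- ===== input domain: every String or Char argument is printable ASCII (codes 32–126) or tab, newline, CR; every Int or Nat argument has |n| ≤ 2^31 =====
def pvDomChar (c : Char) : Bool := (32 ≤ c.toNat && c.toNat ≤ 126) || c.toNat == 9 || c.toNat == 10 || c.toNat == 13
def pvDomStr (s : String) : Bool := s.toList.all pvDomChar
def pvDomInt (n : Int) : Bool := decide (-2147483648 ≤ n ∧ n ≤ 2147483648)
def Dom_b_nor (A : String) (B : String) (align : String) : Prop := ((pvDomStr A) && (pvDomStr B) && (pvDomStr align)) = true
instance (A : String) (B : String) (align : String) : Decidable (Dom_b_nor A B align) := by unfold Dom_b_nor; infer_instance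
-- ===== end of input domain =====

-- B replaces A's per-character zip/join NOR loop with integer arithmetic (parse as binary
-- integers, OR, invert inside an n-bit mask, format back n-wide); A's asserts raise on
-- inputs excluded by Pre_ (objective: idiomatic, same cost).

-- ===== PORT A =====
-- str(int(not(bool(int(a)) or bool(int(b))))) — exact for chars in {'0','1'}, guaranteed by Pre_
def pvNor2A (x y : Char) : Char := if x = '1' ∨ y = '1' then '0' else '1'

def b_nor (A : String) (B : String) (align : String) : String :=
  let pq := if B.toList.length ≤ A.toList.length then (A.toList, B.toList) else (B.toList, A.toList)
  let p := pq.1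
  let q := pq.2
  let q' := if align = "right" then List.replicate (p.length - q.length) '0' ++ q
            else q ++ List.replicate (p.length - q.length) '0'
  String.ofList ((p.zip q').map (fun ab => pvNor2A ab.1 ab.2))

-- ===== PORT B =====
-- int(s, 2) — exact for nonempty strings over {'0','1'} (guaranteed by Pre_)
def pvBit (c : Char) : Nat := if c = '1' then 1 else 0
def pvOfBits (l : List Char) : Nat := l.foldl (fun acc c => 2 * acc + pvBit c) 0
-- format(v, '0{n}b') — exact for v < 2^n with n ≥ 1 (guaranteed by Pre_: res fits the mask)
def pvToBits : Nat → Nat → List Char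
  | 0, _ => []
  | n + 1, v => pvToBits n (v / 2) ++ [if v % 2 = 1 then '1' else '0']

def b_nor_alt (A : String) (B : String) (align : String) : String :=
  let pq := if B.toList.length ≤ A.toList.length then (A.toList, B.toList) else (B.toList, A.toList)
  let p := pq.1
  let q := pq.2
  let n := p.length
  let q' := if align = "right" then List.replicate (n - q.length) '0' ++ q
            else q ++ List.replicate (n - q.length) '0'
  String.ofList (pvToBits n ((2 ^ n - 1) ^^^ (pvOfBits p ||| pvOfBits q')))

-- ===== PRECONDITION & SPEC =====
-- Pre_ is exactly where A's asserts pass (both args nonempty binary strings, align 'right'/'left');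
-- everywhere else the Python A raises AssertionError.
def Pre_b_nor (A : String) (B : String) (align : String) : Prop :=
  A.toList ≠ [] ∧ B.toList ≠ [] ∧
  A.toList.all (fun c => c == '0' || c == '1') = true ∧
  B.toList.all (fun c => c == '0' || c == '1') = true ∧
  (align = "right" ∨ align = "left")
instance (A : String) (B : String) (align : String) : Decidable (Pre_b_nor A B align) := by
  unfold Pre_b_nor; infer_instance

def pvWitness_b_nor : String × String × String := ("10", "0", "right")

def Spec_b_nor (A : String) (B : String) (align : String) (out : String) : Prop := out = b_nor_alt A B align
instance (A : String) (B : String) (align : String) (out : String) : Decidable (Spec_b_nor A B align out) := by unfold Spec_b_nor; infer_instance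

-- ===== CLAIM (what is proved, stated in full; the proofs are below) =====
def Claim_equal_b_nor : Prop := ∀ (A : String) (B : String) (align : String), Dom_b_nor A B align → Pre_b_nor A B align → Spec_b_nor A B align (b_nor A B align)

-- ===== LEMMAS AND PROOFS =====

theorem pvOfBits_append (l : List Char) (c : Char) :
    pvOfBits (l ++ [c]) = Nat.bit (decide (c = '1')) (pvOfBits l) := by
  simp [pvOfBits, List.foldl_append, pvBit, Nat.bit]
  by_cases h : c = '1' <;> simp [h]

theorem lor_bit (bx by' : Bool) (a b : Nat) :
    Nat.bit bx a ||| Nat.bit by' b = Nat.bit (bx || by') (a ||| b) := by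
  simp [HOr.hOr, OrOp.or, Nat.lor, Nat.bitwise_bit]

theorem xor_bit (bx by' : Bool) (a b : Nat) :
    Nat.bit bx a ^^^ Nat.bit by' b = Nat.bit (xor bx by') (a ^^^ b) := by
  simp [HXor.hXor, XorOp.xor, Nat.xor, Nat.bitwise_bit]

theorem mask_succ (n : Nat) : 2 ^ (n + 1) - 1 = Nat.bit true (2 ^ n - 1) := by
  have h : 1 ≤ 2 ^ n := Nat.one_le_two_pow
  simp [Nat.bit, pow_succ]; omega

-- core: the masked-xor-of-or integer computation prints as A's per-char NOR map
theorem pvMain : ∀ p q : List Char, q.length = p.length →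
    (∀ c ∈ p, c = '0' ∨ c = '1') → (∀ c ∈ q, c = '0' ∨ c = '1') →
    pvToBits p.length ((2 ^ p.length - 1) ^^^ (pvOfBits p ||| pvOfBits q))
      = (p.zip q).map (fun ab => pvNor2A ab.1 ab.2) := by
  intro p
  induction p using List.reverseRecOn with
  | nil =>
    intro q hl _ _
    have : q = [] := List.eq_nil_of_length_eq_zero (by simpa using hl)
    subst this; simp [pvToBits]
  | append_singleton p x ih =>
    intro q hl hp hq
    rcases List.eq_nil_or_concat q with rfl | ⟨r, y, rfl⟩
    · simp at hl
    · have hlr : r.length = p.length := by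
        simp at hl; omega
      simp only [List.concat_eq_append] at hq ⊢
      rw [pvOfBits_append, pvOfBits_append, lor_bit, List.length_append,
        List.length_singleton, mask_succ, xor_bit,
        List.zip_append (by omega), List.map_append]
      simp only [pvToBits, Nat.bit_div_two, Nat.bit_mod_two,
        List.zip_cons_cons, List.map_cons]
      rw [ih r hlr (fun c hc => hp c (by simp [hc])) (fun c hc => hq c (by simp [hc]))]
      congr 1
      have hx := hp x (by simp)
      have hy := hq y (by simp)
      rcases hx with hx | hx <;> rcases hy with hy | hy <;> subst hx <;> subst hy <;> decide

theorem pvBinPadRight (q : List Char) (k : Nat) (hq : ∀ c ∈ q, c = '0' ∨ c = '1') :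
    ∀ c ∈ List.replicate k '0' ++ q, c = '0' ∨ c = '1' := by
  intro c hc
  rcases List.mem_append.mp hc with h | h
  · exact Or.inl (List.eq_of_mem_replicate h)
  · exact hq c h

theorem pvBinPadLeft (q : List Char) (k : Nat) (hq : ∀ c ∈ q, c = '0' ∨ c = '1') :
    ∀ c ∈ q ++ List.replicate k '0', c = '0' ∨ c = '1' := by
  intro c hc
  rcases List.mem_append.mp hc with h | h
  · exact hq c h
  · exact Or.inl (List.eq_of_mem_replicate h)

-- A = B once (p, q) is chosen: both pad q the same way, then pvMain equates the two computations
theorem pvTop (p q : List Char) (align : String) (h : q.length ≤ p.length)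
    (hp : ∀ c ∈ p, c = '0' ∨ c = '1') (hq : ∀ c ∈ q, c = '0' ∨ c = '1') :
    String.ofList ((p.zip (if align = "right" then List.replicate (p.length - q.length) '0' ++ q
        else q ++ List.replicate (p.length - q.length) '0')).map (fun ab => pvNor2A ab.1 ab.2))
      = String.ofList (pvToBits p.length ((2 ^ p.length - 1) ^^^ (pvOfBits p |||
          pvOfBits (if align = "right" then List.replicate (p.length - q.length) '0' ++ q
            else q ++ List.replicate (p.length - q.length) '0')))) := by
  by_cases ha : align = "right" <;> simp only [ha, reduceIte]
  · rw [pvMain p _ (by simp; omega) hp (pvBinPadRight q _ hq)]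
  · rw [pvMain p _ (by simp; omega) hp (pvBinPadLeft q _ hq)]

-- ===== VERDICT (by name: the statement is the Claim_ definition above) =====
theorem b_nor_spec : Claim_equal_b_nor := by
  intro A B align _ hPre
  obtain ⟨_, _, hA0, hB0, _⟩ := hPre
  have hA : ∀ c ∈ A.toList, c = '0' ∨ c = '1' := by
    intro c hc; have := List.all_eq_true.mp hA0 c hc; simpa using this
  have hB : ∀ c ∈ B.toList, c = '0' ∨ c = '1' := by
    intro c hc; have := List.all_eq_true.mp hB0 c hc; simpa using this
  unfold Spec_b_nor b_nor b_nor_alt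
  by_cases h : B.toList.length ≤ A.toList.length <;>
    simp only [h, reduceIte]
  · exact pvTop A.toList B.toList align h hA hB
  · exact pvTop B.toList A.toList align (by omega) hB hA
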